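-- pv_equiv track=rewrite | github.com/LynxTWO/mix-marriage-offline | src/mmo/core/cache_keys.py | _normalize_profile_ids_for_cache
-- ===== SOURCE A (Python) =====
-- def _normalize_profile_ids_for_cache(profile_ids: list[str]) -> list[str]:
--     if not isinstance(profile_ids, list):
--         raise ValueError("profile_ids must be a list of profile identifiers.")
--
--     normalized: set[str] = set()
--     for profile_id in profile_ids:
--         if not isinstance(profile_id, str):
--             continue
--         token = profile_id.strip()
--         if token:
--             normalized.add(token)
--     if not normalized:
--         raise ValueError("At least one translation profile_id is required.")
--     return sorted(normalized)
-- ===== SOURCE B (Python) =====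
-- def _merge_unique(xs: list[str], ys: list[str]) -> list[str]:
--     # merge two sorted duplicate-free lists, collapsing equal heads
--     out: list[str] = []
--     i = j = 0
--     while i < len(xs) and j < len(ys):
--         if xs[i] < ys[j]:
--             out.append(xs[i]); i += 1
--         elif ys[j] < xs[i]:
--             out.append(ys[j]); j += 1
--         else:
--             out.append(xs[i]); i += 1; j += 1
--     out.extend(xs[i:])
--     out.extend(ys[j:])
--     return out
--
--
-- def _merge_sort_unique(xs: list[str]) -> list[str]:
--     if len(xs) <= 1:
--         return xs[:]
--     mid = len(xs) // 2
--     return _merge_unique(_merge_sort_unique(xs[:mid]), _merge_sort_unique(xs[mid:]))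
--
--
-- def _normalize_profile_ids_for_cache(profile_ids: list[str]) -> list[str]:
--     if not isinstance(profile_ids, list):
--         raise ValueError("profile_ids must be a list of profile identifiers.")
--
--     tokens: list[str] = []
--     for profile_id in profile_ids:
--         if isinstance(profile_id, str):
--             token = profile_id.strip()
--             if token:
--                 tokens.append(token)
--     result = _merge_sort_unique(tokens)
--     if not result:
--         raise ValueError("At least one translation profile_id is required.")
--     return result
-- ===== Notes on version B (the rewrite author's own statement) =====
-- stated objective: alternative
-- what changed: Replaces A's accumulate-into-a-set-then-library-sort with a hand-written divide-and-conquer merge sort over the stripped non-empty tokens whose merge step collapses equal heads, so deduplication is fused into the merging and no set or sort call is used; both ValueError guards and messages are preserved.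
import Mathlib
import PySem

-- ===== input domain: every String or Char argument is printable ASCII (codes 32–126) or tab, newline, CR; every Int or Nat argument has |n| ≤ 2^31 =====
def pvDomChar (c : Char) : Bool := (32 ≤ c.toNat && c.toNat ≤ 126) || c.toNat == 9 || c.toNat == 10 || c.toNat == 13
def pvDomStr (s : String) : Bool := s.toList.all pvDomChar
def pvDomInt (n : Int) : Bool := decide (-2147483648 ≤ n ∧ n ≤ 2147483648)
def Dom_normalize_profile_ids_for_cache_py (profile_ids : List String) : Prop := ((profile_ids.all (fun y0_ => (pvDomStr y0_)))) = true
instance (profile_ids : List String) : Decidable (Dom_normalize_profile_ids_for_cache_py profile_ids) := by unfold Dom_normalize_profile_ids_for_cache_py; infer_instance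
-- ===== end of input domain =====

-- B replaces A's set-accumulate-then-library-sort with a hand-written divide-and-conquer merge sort
-- of the stripped non-empty tokens whose merge step collapses equal heads (dedupe fused into merging;
-- no set, no sort call); objective: alternative.
-- Both Pythons raise ValueError when no non-empty stripped token exists; Pre_ excludes exactly those inputs.

-- ===== PORT A =====
def normalize_profile_ids_for_cache_py (profile_ids : List String) : List String :=
  let normalized : PySem.Set String :=
    profile_ids.foldl (fun s profile_id =>
      let token := PySem.Str.strip profile_id
      if token ≠ "" then PySem.Set.add s token else s) PySem.Set.empty
  PySem.List.sorted normalized (fun x => x) false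

-- ===== PORT B =====
-- B's iterative two-pointer merge (with its trailing extends) transcribed as the obvious
-- structural recursion over the two lists; equal heads collapse to one element.
def mergeUnique : List String → List String → List String
  | [], ys => ys
  | x :: xs, [] => x :: xs
  | x :: xs, y :: ys =>
    if x < y then x :: mergeUnique xs (y :: ys)
    else if y < x then y :: mergeUnique (x :: xs) ys
    else x :: mergeUnique xs ys
termination_by xs ys => xs.length + ys.length

def msortUnique (xs : List String) : List String :=
  if xs.length ≤ 1 then xs
  else
    let mid := xs.length / 2
    mergeUnique (msortUnique (xs.take mid)) (msortUnique (xs.drop mid))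
termination_by xs.length
decreasing_by
  · simp only [List.length_take]; omega
  · simp only [List.length_drop]; omega

def normalize_profile_ids_for_cache_py_alt (profile_ids : List String) : List String :=
  let tokens : List String :=
    profile_ids.foldl (fun acc profile_id =>
      let token := PySem.Str.strip profile_id
      if token ≠ "" then acc ++ [token] else acc) []
  msortUnique tokens

-- ===== PRECONDITION & SPEC =====
-- Pre_ excludes exactly the inputs with no non-empty stripped string, where both A and B raise ValueError.
def Pre_normalize_profile_ids_for_cache_py (profile_ids : List String) : Prop :=
  ∃ s ∈ profile_ids, PySem.Str.strip s ≠ ""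
instance (profile_ids : List String) : Decidable (Pre_normalize_profile_ids_for_cache_py profile_ids) := by unfold Pre_normalize_profile_ids_for_cache_py; infer_instance

def pvWitness_normalize_profile_ids_for_cache_py : List String := ["b", " a ", "b"]

def Spec_normalize_profile_ids_for_cache_py (profile_ids : List String) (out : List String) : Prop := out = normalize_profile_ids_for_cache_py_alt profile_ids
instance (profile_ids : List String) (out : List String) : Decidable (Spec_normalize_profile_ids_for_cache_py profile_ids out) := by unfold Spec_normalize_profile_ids_for_cache_py; infer_instance

-- ===== CLAIM (what is proved, stated in full; the proofs are below) =====
def Claim_equal_normalize_profile_ids_for_cache_py : Prop := ∀ (profile_ids : List String), Dom_normalize_profile_ids_for_cache_py profile_ids → Pre_normalize_profile_ids_for_cache_py profile_ids → Spec_normalize_profile_ids_for_cache_py profile_ids (normalize_profile_ids_for_cache_py profile_ids)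

-- ===== LEMMAS AND PROOFS =====

theorem mergeUnique_spec (xs : List String) : ∀ (ys : List String),
    xs.Pairwise (· < ·) → ys.Pairwise (· < ·) →
    (mergeUnique xs ys).Pairwise (· < ·) ∧
    (∀ z, z ∈ mergeUnique xs ys ↔ z ∈ xs ∨ z ∈ ys) := by
  induction xs with
  | nil => intro ys _ hy; simp only [mergeUnique]; exact ⟨hy, fun z => by simp⟩
  | cons x xs ihx =>
    intro ys hx hy
    induction ys with
    | nil => simp only [mergeUnique]; exact ⟨hx, fun z => by simp⟩
    | cons y ys ihy =>
      obtain ⟨hxall, hxtail⟩ := List.pairwise_cons.mp hx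
      obtain ⟨hyall, hytail⟩ := List.pairwise_cons.mp hy
      by_cases h1 : x < y
      · rw [show mergeUnique (x :: xs) (y :: ys) = x :: mergeUnique xs (y :: ys) from by
          rw [mergeUnique]; simp [h1]]
        obtain ⟨m1, m2⟩ := ihx (y :: ys) hxtail hy
        refine ⟨List.pairwise_cons.mpr ⟨fun z hz => ?_, m1⟩, fun z => ?_⟩
        · rcases (m2 z).mp hz with hz' | hz'
          · exact hxall z hz'
          · rcases List.mem_cons.mp hz' with rfl | hz''
            · exact h1
            · exact lt_trans h1 (hyall z hz'')
        · simp only [List.mem_cons, m2 z]; tauto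
      · by_cases h2 : y < x
        · rw [show mergeUnique (x :: xs) (y :: ys) = y :: mergeUnique (x :: xs) ys from by
            rw [mergeUnique]; simp [h1, h2]]
          obtain ⟨m1, m2⟩ := ihy hytail
          refine ⟨List.pairwise_cons.mpr ⟨fun z hz => ?_, m1⟩, fun z => ?_⟩
          · rcases (m2 z).mp hz with hz' | hz'
            · rcases List.mem_cons.mp hz' with rfl | hz''
              · exact h2
              · exact lt_trans h2 (hxall z hz'')
            · exact hyall z hz'
          · simp only [List.mem_cons, m2 z]; tauto
        · have hxy : x = y := le_antisymm (not_lt.mp h2) (not_lt.mp h1)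
          rw [show mergeUnique (x :: xs) (y :: ys) = x :: mergeUnique xs ys from by
            rw [mergeUnique]; simp [h1, h2]]
          obtain ⟨m1, m2⟩ := ihx ys hxtail hytail
          refine ⟨List.pairwise_cons.mpr ⟨fun z hz => ?_, m1⟩, fun z => ?_⟩
          · rcases (m2 z).mp hz with hz' | hz'
            · exact hxall z hz'
            · exact hxy ▸ hyall z hz'
          · simp only [List.mem_cons, m2 z, hxy]; tauto

theorem msortUnique_spec_aux (n : Nat) : ∀ (xs : List String), xs.length ≤ n →
    (msortUnique xs).Pairwise (· < ·) ∧ (∀ z, z ∈ msortUnique xs ↔ z ∈ xs) := by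
  induction n with
  | zero =>
    intro xs hn
    have : xs = [] := List.eq_nil_of_length_eq_zero (Nat.le_zero.mp hn)
    subst this
    simp [msortUnique]
  | succ n ih =>
    intro xs hn
    by_cases hlen : xs.length ≤ 1
    · rw [show msortUnique xs = xs from by rw [msortUnique]; simp [hlen]]
      refine ⟨?_, fun z => Iff.rfl⟩
      match xs, hlen with
      | [], _ => exact List.Pairwise.nil
      | [x], _ => exact List.pairwise_singleton _ _
    · rw [show msortUnique xs
          = mergeUnique (msortUnique (xs.take (xs.length / 2)))
              (msortUnique (xs.drop (xs.length / 2))) from by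
        rw [msortUnique]; simp [hlen]]
      have hlt : ¬ xs.length ≤ 1 := hlen
      have ht : (xs.take (xs.length / 2)).length ≤ n := by
        simp only [List.length_take]; omega
      have hd : (xs.drop (xs.length / 2)).length ≤ n := by
        simp only [List.length_drop]; omega
      obtain ⟨t1, t2⟩ := ih _ ht
      obtain ⟨d1, d2⟩ := ih _ hd
      obtain ⟨m1, m2⟩ := mergeUnique_spec _ _ t1 d1
      refine ⟨m1, fun z => ?_⟩
      rw [m2 z, t2 z, d2 z]
      constructor
      · rintro (h | h)
        · exact List.mem_of_mem_take h
        · exact List.mem_of_mem_drop h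
      · intro h
        rw [← List.take_append_drop (xs.length / 2) xs] at h
        exact List.mem_append.mp h

theorem setfold_eq_update (pids : List String) (s : PySem.Set String) :
    pids.foldl (fun s profile_id =>
        let token := PySem.Str.strip profile_id
        if token ≠ "" then PySem.Set.add s token else s) s
      = PySem.Set.update s
          ((pids.filter (fun pid => decide (PySem.Str.strip pid ≠ ""))).map PySem.Str.strip) := by
  rw [PySem.Set.update_map_eq_foldl_add, List.foldl_filter]
  simp

-- ===== VERDICT (by name: the statement is the Claim_ definition above) =====
theorem normalize_profile_ids_for_cache_py_spec : Claim_equal_normalize_profile_ids_for_cache_py := by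
  intro pids _ _
  unfold Spec_normalize_profile_ids_for_cache_py
  unfold normalize_profile_ids_for_cache_py normalize_profile_ids_for_cache_py_alt
  simp only
  set L := (pids.filter (fun pid => decide (PySem.Str.strip pid ≠ ""))).map PySem.Str.strip with hL
  have hA : pids.foldl (fun s profile_id =>
        let token := PySem.Str.strip profile_id
        if token ≠ "" then PySem.Set.add s token else s) PySem.Set.empty
      = PySem.Set.ofList L := by
    rw [setfold_eq_update]
    exact PySem.Set.update_empty _
  have hB : pids.foldl (fun acc profile_id =>
        let token := PySem.Str.strip profile_id
        if token ≠ "" then acc ++ [token] else acc) ([] : List String) = L := by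
    simpa [hL] using PySem.List.foldl_append_if
      (fun pid => decide (PySem.Str.strip pid ≠ "")) PySem.Str.strip pids []
  rw [hA, hB]
  obtain ⟨hlt, hmem⟩ := msortUnique_spec_aux L.length L le_rfl
  have hnd1 : (msortUnique L).Nodup := hlt.imp (fun h => ne_of_lt h)
  have hnd2 : (PySem.Set.ofList L).Nodup := PySem.Set.nodup_ofList L
  have hperm : (msortUnique L).Perm (PySem.Set.ofList L) := by
    refine List.perm_of_nodup_nodup_toFinset_eq hnd1 hnd2 ?_
    ext z
    simp only [List.mem_toFinset]
    rw [hmem z, PySem.Set.mem_ofList]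
  simpa using PySem.List.sorted_eq_of_perm_of_pairwise_lt (PySem.Set.ofList L)
    (msortUnique L) (fun x => x) hperm hlt
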